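-- pv_equiv track=rewrite | github.com/CptAdolito/Hundir-La-Flota | tablero.py | calcularEstadoTablero
-- ===== SOURCE A (Python) =====
-- def calcularEstadoTablero(lista_barcos, lista_tocados, turno):
--     #Creamos listas para casillas de barcos tocados y hundidos
--     barcosHundidos = list()
--     barcosTocados = list()
--
--     #Para cada casilla de barco la agrego a "hundidos", pero si no ha sido tocado añado el barco completo a "tocados"
--     for i in range(len(lista_barcos)):
--         for j in range(len(lista_barcos[i])):
--             barcosHundidos += [lista_barcos[i][j]]
--             if lista_barcos[i][j] not in lista_tocados:
--                 for k in range(len(lista_barcos[i])):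
--                     barcosTocados += [lista_barcos[i][k]]
--     estadoCoordenadas = list()
--     #Para cada casilla tocada
--     for i in range(len(lista_tocados)):
--         #Si está tocado coloco una "T", si está hundido pero no tocado una "H" y si no es ningún caso una "A"
--         if lista_tocados[i] in barcosTocados:
--             estadoCoordenadas += ["T"]
--         elif lista_tocados[i] in barcosHundidos:
--             estadoCoordenadas += ["H"]
--         else:
--             estadoCoordenadas += ["A"]
--
--     #Más variables de ayuda para construir el tablero
--     tablero = [["     ","║ 01 ║"," 02 ║"," 03 ║"," 04 ║"," 05 ║"," 06 ║"," 07 ║"," 08 ║"," 09 ║"," 10 ║"," 11 ║"," 12 ║"," 13 ║"," 14 ║"," 15 ║"," 16 ║"]]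
--     columnas = ["║ A ║","║ B ║","║ C ║","║ D ║","║ E ║","║ F ║","║ G ║","║ H ║","║ I ║","║ J ║","║ K ║","║ L ║","║ M ║","║ N ║","║ O ║","║ P ║",""]
--
--     #Finalmente, contruimos el tablero por filas
--     for i in range(0, 17):
--         tablero.append([columnas[i], "│"])
--         if i > 0:
--             for j in range(1,17):
--                 #Si esta coordenada ha sido tocada miramos en su estado y añadimos el símbolo que necesitemos
--                 if [i,j] in lista_tocados:
--                     ubicacionCoordenada = lista_tocados.index([i,j])
--                     if estadoCoordenadas[ubicacionCoordenada] == "T":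
--                         tablero[i].append(" ░░ │")
--                     elif estadoCoordenadas[ubicacionCoordenada] == "H":
--                         tablero[i].append(" ██ │")
--                     else:
--                         tablero[i].append(" ~~ │")
--                 #Si es tu propio tablero y no han tocado un barco lo pintamos con casillas distintas
--                 elif turno == 1:
--                     if any([i,j] in k for k in lista_barcos):
--                         tablero[i].append(" ¤¤ │")
--                     else:
--                         tablero[i].append("    │")
--                 else:
--                     tablero[i].append("    │")
--     return tablero
-- ===== SOURCE B (Python) =====
-- def calcularEstadoTablero(lista_barcos, lista_tocados, turno):
--     # Classify once: a coordinate in a ship with any untouched cell is "touched" (T),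
--     # otherwise if it is a ship cell it is "sunk" (H); scatter symbols into a 16x16 map.
--     touched = {tuple(c) for c in lista_tocados}
--     in_ship = set()
--     in_nonsunk = set()
--     for ship in lista_barcos:
--         cells = [tuple(c) for c in ship]
--         in_ship.update(cells)
--         if not all(c in touched for c in cells):
--             in_nonsunk.update(cells)
--
--     cell_map = {}
--     if turno == 1:
--         for ship in lista_barcos:
--             for c in ship:
--                 if len(c) == 2 and 1 <= c[0] <= 16 and 1 <= c[1] <= 16:
--                     cell_map[(c[0], c[1])] = " ¤¤ │"
--     for c in lista_tocados:
--         if len(c) == 2 and 1 <= c[0] <= 16 and 1 <= c[1] <= 16: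
--             t = tuple(c)
--             if t in in_nonsunk:
--                 sym = " ░░ │"
--             elif t in in_ship:
--                 sym = " ██ │"
--             else:
--                 sym = " ~~ │"
--             cell_map[(c[0], c[1])] = sym
--
--     cabecera = ["     ","║ 01 ║"," 02 ║"," 03 ║"," 04 ║"," 05 ║"," 06 ║"," 07 ║"," 08 ║"," 09 ║"," 10 ║"," 11 ║"," 12 ║"," 13 ║"," 14 ║"," 15 ║"," 16 ║"]
--     columnas = ["║ A ║","║ B ║","║ C ║","║ D ║","║ E ║","║ F ║","║ G ║","║ H ║","║ I ║","║ J ║","║ K ║","║ L ║","║ M ║","║ N ║","║ O ║","║ P ║"]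
--     tablero = [cabecera]
--     for r in range(16):
--         tablero.append([columnas[r], "│"] + [cell_map.get((r + 1, j), "    │") for j in range(1, 17)])
--     tablero.append(["", "│"])
--     return tablero
-- ===== Notes on version B (the rewrite author's own statement) =====
-- stated objective: faster
-- what changed: B classifies each ship once into touched/sunk sets and scatters symbols into a coordinate-to-symbol dictionary built in one pass, then assembles the 18 rows by lookup, instead of A's per-cell scans of lista_tocados and lista_barcos (plus list.index) for each of the 256 board cells and its quadratic barcosTocados list.
import Mathlib
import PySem

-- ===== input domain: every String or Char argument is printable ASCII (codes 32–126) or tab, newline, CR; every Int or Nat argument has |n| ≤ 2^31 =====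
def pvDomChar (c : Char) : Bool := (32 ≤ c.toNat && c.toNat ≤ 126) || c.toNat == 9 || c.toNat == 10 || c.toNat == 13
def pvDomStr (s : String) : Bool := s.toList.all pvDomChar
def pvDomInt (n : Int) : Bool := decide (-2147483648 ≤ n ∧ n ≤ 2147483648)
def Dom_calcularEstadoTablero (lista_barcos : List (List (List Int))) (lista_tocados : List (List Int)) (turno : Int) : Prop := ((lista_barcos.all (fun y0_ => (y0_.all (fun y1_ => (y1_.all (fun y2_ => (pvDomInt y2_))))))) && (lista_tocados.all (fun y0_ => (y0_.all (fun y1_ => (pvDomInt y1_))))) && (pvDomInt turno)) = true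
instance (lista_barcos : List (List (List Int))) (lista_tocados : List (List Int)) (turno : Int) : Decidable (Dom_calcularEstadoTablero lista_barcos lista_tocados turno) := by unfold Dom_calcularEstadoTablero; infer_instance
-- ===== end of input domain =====

-- B replaces A's per-cell scans of lista_tocados/lista_barcos by a one-pass classification
-- into sets plus a coordinate→symbol dictionary scattered once; objective: faster.


-- ===== PORT A =====

-- The header row and the row labels (A's literals).
def pvCabecera : List String := ["     ","║ 01 ║"," 02 ║"," 03 ║"," 04 ║"," 05 ║"," 06 ║"," 07 ║"," 08 ║"," 09 ║"," 10 ║"," 11 ║"," 12 ║"," 13 ║"," 14 ║"," 15 ║"," 16 ║"]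
def pvColumnas : List String := ["║ A ║","║ B ║","║ C ║","║ D ║","║ E ║","║ F ║","║ G ║","║ H ║","║ I ║","║ J ║","║ K ║","║ L ║","║ M ║","║ N ║","║ O ║","║ P ║",""]

-- A's first double loop: (barcosHundidos, barcosTocados).
def aHull (lista_barcos : List (List (List Int))) (lista_tocados : List (List Int)) :
    List (List Int) × List (List Int) :=
  lista_barcos.foldl (fun p barco =>
    barco.foldl (fun q casilla =>
      let q := (q.1 ++ [casilla], q.2)
      if casilla ∈ lista_tocados then q else (q.1, q.2 ++ barco)) p) ([], [])

-- A's second loop: estadoCoordenadas.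
def aEstado (lista_barcos : List (List (List Int))) (lista_tocados : List (List Int)) : List String :=
  lista_tocados.foldl (fun acc c =>
    if c ∈ (aHull lista_barcos lista_tocados).2 then acc ++ ["T"]
    else if c ∈ (aHull lista_barcos lista_tocados).1 then acc ++ ["H"]
    else acc ++ ["A"]) []

-- the symbol A appends at board cell (i, j) (the body of A's innermost loop)
def aSym (lista_barcos : List (List (List Int))) (lista_tocados : List (List Int))
    (estadoCoordenadas : List String) (turno : Int) (i j : Int) : String :=
  if [i, j] ∈ lista_tocados then
    let ubicacion : Nat := (PySem.List.index? lista_tocados [i, j]).getD 0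
    let st := PySem.List.pyGetD estadoCoordenadas (ubicacion : Int) ""
    if st = "T" then " ░░ │" else if st = "H" then " ██ │" else " ~~ │"
  else if turno = 1 then
    (if lista_barcos.any (fun k => [i, j] ∈ k) then " ¤¤ │" else "    │")
  else "    │"

def calcularEstadoTablero (lista_barcos : List (List (List Int))) (lista_tocados : List (List Int)) (turno : Int) : List (List String) :=
  let estadoCoordenadas := aEstado lista_barcos lista_tocados
  -- for i in range(0, 17): append the next row, then (i > 0) fill row i cell by cell
  (PySem.List.pyRange 0 17 1).foldl (fun tablero i =>
    let tablero := tablero ++ [[PySem.List.pyGetD pvColumnas i "", "│"]]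
    if i > 0 then
      (PySem.List.pyRange 1 17 1).foldl (fun tab j =>
        -- tablero[i].append(sym); i comes from range(0,17) so i.toNat is exact
        tab.modify i.toNat (fun fila => fila ++ [aSym lista_barcos lista_tocados estadoCoordenadas turno i j])) tablero
    else tablero) [pvCabecera]

-- ===== PORT B =====

-- B's coordinate check: a cell is drawable iff it is [x, y] with 1 ≤ x,y ≤ 16
def bKey? (c : List Int) : Option (Int × Int) :=
  match c with
  | [x, y] => if 1 ≤ x ∧ x ≤ 16 ∧ 1 ≤ y ∧ y ≤ 16 then some (x, y) else none
  | _ => none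

-- B's classification pass: (in_ship, in_nonsunk)
def bSets (lista_barcos : List (List (List Int))) (lista_tocados : List (List Int)) :
    PySem.Set (List Int) × PySem.Set (List Int) :=
  let touched : PySem.Set (List Int) := PySem.Set.ofList lista_tocados
  lista_barcos.foldl (fun p ship =>
    (PySem.Set.update p.1 ship,
     if ship.all (fun c => PySem.Set.contains touched c) then p.2
     else PySem.Set.update p.2 ship)) (PySem.Set.empty, PySem.Set.empty)

-- B's scatter pass: coordinate → symbol map
def bCellMap (lista_barcos : List (List (List Int))) (lista_tocados : List (List Int)) (turno : Int) :
    PySem.Dict (Int × Int) String :=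
  let s := bSets lista_barcos lista_tocados
  let base : PySem.Dict (Int × Int) String :=
    if turno = 1 then
      lista_barcos.foldl (fun d ship =>
        ship.foldl (fun d c =>
          match bKey? c with
          | some k => d.insert k " ¤¤ │"
          | none => d) d) PySem.Dict.empty
    else PySem.Dict.empty
  lista_tocados.foldl (fun d c =>
    match bKey? c with
    | some k => d.insert k
        (if PySem.Set.contains s.2 c then " ░░ │"
         else if PySem.Set.contains s.1 c then " ██ │" else " ~~ │")
    | none => d) base

def calcularEstadoTablero_alt (lista_barcos : List (List (List Int))) (lista_tocados : List (List Int)) (turno : Int) : List (List String) :=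
  let cellMap := bCellMap lista_barcos lista_tocados turno
  [pvCabecera] ++
    (List.range 16).map (fun r =>
      [pvColumnas.getD r "", "│"] ++
        (List.range 16).map (fun j : Nat => cellMap.getD ((r : Int) + 1, (j : Int) + 1) "    │")) ++
    [["", "│"]]

-- ===== PRECONDITION & SPEC =====
def Spec_calcularEstadoTablero (lista_barcos : List (List (List Int))) (lista_tocados : List (List Int)) (turno : Int) (out : List (List String)) : Prop := out = calcularEstadoTablero_alt lista_barcos lista_tocados turno
instance (lista_barcos : List (List (List Int))) (lista_tocados : List (List Int)) (turno : Int) (out : List (List String)) : Decidable (Spec_calcularEstadoTablero lista_barcos lista_tocados turno out) := by unfold Spec_calcularEstadoTablero; infer_instance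

-- ===== CLAIM (what is proved, stated in full; the proofs are below) =====
def Claim_equal_calcularEstadoTablero : Prop := ∀ (lista_barcos : List (List (List Int))) (lista_tocados : List (List Int)) (turno : Int), Dom_calcularEstadoTablero lista_barcos lista_tocados turno → Spec_calcularEstadoTablero lista_barcos lista_tocados turno (calcularEstadoTablero lista_barcos lista_tocados turno)

-- ===== LEMMAS AND PROOFS =====

theorem inner_mem (lt : List (List Int)) (barco : List (List Int)) :
    ∀ (cs : List (List Int)) (q : List (List Int) × List (List Int)) (x : List Int),
    (x ∈ (cs.foldl (fun q casilla =>
      let q := (q.1 ++ [casilla], q.2)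
      if casilla ∈ lt then q else (q.1, q.2 ++ barco)) q).1 ↔ x ∈ q.1 ∨ x ∈ cs)
    ∧ (x ∈ (cs.foldl (fun q casilla =>
      let q := (q.1 ++ [casilla], q.2)
      if casilla ∈ lt then q else (q.1, q.2 ++ barco)) q).2 ↔ x ∈ q.2 ∨ ((∃ d ∈ cs, d ∉ lt) ∧ x ∈ barco)) := by
  intro cs
  induction cs with
  | nil => simp
  | cons c cs ih =>
    intro q x
    constructor
    · simp only [List.foldl_cons]
      by_cases hc : c ∈ lt <;> simp [hc, (ih _ x).1] <;> tauto
    · simp only [List.foldl_cons]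
      by_cases hc : c ∈ lt <;> simp [hc, (ih _ x).2] <;> tauto

theorem mem_aHull_fst (lb : List (List (List Int))) (lt : List (List Int)) (c : List Int) :
    c ∈ (aHull lb lt).1 ↔ ∃ s ∈ lb, c ∈ s := by
  unfold aHull
  suffices h : ∀ (p : List (List Int) × List (List Int)),
      c ∈ (lb.foldl (fun p barco => barco.foldl (fun q casilla =>
        let q := (q.1 ++ [casilla], q.2)
        if casilla ∈ lt then q else (q.1, q.2 ++ barco)) p) p).1 ↔ c ∈ p.1 ∨ ∃ s ∈ lb, c ∈ s by
    simpa using h ([], [])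
  induction lb with
  | nil => simp
  | cons b bs ih =>
    intro p
    simp only [List.mem_cons, exists_eq_or_imp, List.foldl_cons, ih, (inner_mem lt b b p c).1]
    tauto

theorem mem_aHull_snd (lb : List (List (List Int))) (lt : List (List Int)) (c : List Int) :
    c ∈ (aHull lb lt).2 ↔ ∃ s ∈ lb, c ∈ s ∧ ∃ d ∈ s, d ∉ lt := by
  unfold aHull
  suffices h : ∀ (p : List (List Int) × List (List Int)),
      c ∈ (lb.foldl (fun p barco => barco.foldl (fun q casilla =>
        let q := (q.1 ++ [casilla], q.2)
        if casilla ∈ lt then q else (q.1, q.2 ++ barco)) p) p).2 ↔ c ∈ p.2 ∨ ∃ s ∈ lb, c ∈ s ∧ ∃ d ∈ s, d ∉ lt by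
    simpa using h ([], [])
  induction lb with
  | nil => simp
  | cons b bs ih =>
    intro p
    simp only [List.mem_cons, exists_eq_or_imp, List.foldl_cons, ih, (inner_mem lt b b p c).2]
    constructor
    · rintro ((h | ⟨hd, hc⟩) | h)
      · exact Or.inl h
      · exact Or.inr (Or.inl ⟨hc, hd⟩)
      · exact Or.inr (Or.inr h)
    · rintro (h | ⟨hc, hd⟩ | h)
      · exact Or.inl (Or.inl h)
      · exact Or.inl (Or.inr ⟨hd, hc⟩)
      · exact Or.inr h

theorem mem_bSets_fst (lb : List (List (List Int))) (lt : List (List Int)) (c : List Int) :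
    c ∈ (bSets lb lt).1 ↔ ∃ s ∈ lb, c ∈ s := by
  unfold bSets
  suffices h : ∀ (p : PySem.Set (List Int) × PySem.Set (List Int)),
      (c ∈ (lb.foldl (fun p ship =>
        (PySem.Set.update p.1 ship,
         if ship.all (fun c => PySem.Set.contains (PySem.Set.ofList lt) c) then p.2
         else PySem.Set.update p.2 ship)) p).1 ↔ c ∈ p.1 ∨ ∃ s ∈ lb, c ∈ s)
      ∧ (c ∈ (lb.foldl (fun p ship =>
        (PySem.Set.update p.1 ship,
         if ship.all (fun c => PySem.Set.contains (PySem.Set.ofList lt) c) then p.2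
         else PySem.Set.update p.2 ship)) p).2 ↔ c ∈ p.2 ∨ ∃ s ∈ lb, c ∈ s ∧ ∃ d ∈ s, d ∉ lt) by
    simpa using (h (PySem.Set.empty, PySem.Set.empty)).1
  induction lb with
  | nil => simp [PySem.Set.empty]
  | cons b bs ih =>
    intro p
    have hall : (b.all (fun c => PySem.Set.contains (PySem.Set.ofList lt) c)) = true ↔ ∀ d ∈ b, d ∈ lt := by
      simp [List.all_eq_true, PySem.Set.contains_iff, PySem.Set.mem_ofList]
    constructor
    · simp only [List.mem_cons, exists_eq_or_imp, List.foldl_cons, (ih _).1, PySem.Set.mem_update]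
      tauto
    · simp only [List.mem_cons, exists_eq_or_imp, List.foldl_cons, (ih _).2]
      have hiff : (∃ d ∈ b, d ∉ lt) ↔ ¬ (b.all (fun c => PySem.Set.contains (PySem.Set.ofList lt) c) = true) := by
        simp [List.all_eq_true, PySem.Set.mem_ofList]
      by_cases hb : (b.all (fun c => PySem.Set.contains (PySem.Set.ofList lt) c)) = true
      · simp only [if_pos hb]
        have hnd : ¬ (∃ d ∈ b, d ∉ lt) := by rw [hiff]; simpa using hb
        tauto
      · simp only [if_neg hb, PySem.Set.mem_update]
        have hd : (∃ d ∈ b, d ∉ lt) := hiff.mpr hb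
        constructor
        · rintro ((h | h) | h)
          · exact Or.inl h
          · exact Or.inr (Or.inl ⟨h, hd⟩)
          · exact Or.inr (Or.inr h)
        · rintro (h | ⟨hc, _⟩ | h)
          · exact Or.inl (Or.inl h)
          · exact Or.inl (Or.inr hc)
          · exact Or.inr h

theorem mem_bSets_snd (lb : List (List (List Int))) (lt : List (List Int)) (c : List Int) :
    c ∈ (bSets lb lt).2 ↔ ∃ s ∈ lb, c ∈ s ∧ ∃ d ∈ s, d ∉ lt := by
  unfold bSets
  suffices h : ∀ (p : PySem.Set (List Int) × PySem.Set (List Int)),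
      (c ∈ (lb.foldl (fun p ship =>
        (PySem.Set.update p.1 ship,
         if ship.all (fun c => PySem.Set.contains (PySem.Set.ofList lt) c) then p.2
         else PySem.Set.update p.2 ship)) p).1 ↔ c ∈ p.1 ∨ ∃ s ∈ lb, c ∈ s)
      ∧ (c ∈ (lb.foldl (fun p ship =>
        (PySem.Set.update p.1 ship,
         if ship.all (fun c => PySem.Set.contains (PySem.Set.ofList lt) c) then p.2
         else PySem.Set.update p.2 ship)) p).2 ↔ c ∈ p.2 ∨ ∃ s ∈ lb, c ∈ s ∧ ∃ d ∈ s, d ∉ lt) by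
    simpa using (h (PySem.Set.empty, PySem.Set.empty)).2
  induction lb with
  | nil => simp [PySem.Set.empty]
  | cons b bs ih =>
    intro p
    have hall : (b.all (fun c => PySem.Set.contains (PySem.Set.ofList lt) c)) = true ↔ ∀ d ∈ b, d ∈ lt := by
      simp [List.all_eq_true, PySem.Set.contains_iff, PySem.Set.mem_ofList]
    constructor
    · simp only [List.mem_cons, exists_eq_or_imp, List.foldl_cons, (ih _).1, PySem.Set.mem_update]
      tauto
    · simp only [List.mem_cons, exists_eq_or_imp, List.foldl_cons, (ih _).2]
      have hiff : (∃ d ∈ b, d ∉ lt) ↔ ¬ (b.all (fun c => PySem.Set.contains (PySem.Set.ofList lt) c) = true) := by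
        simp [List.all_eq_true, PySem.Set.mem_ofList]
      by_cases hb : (b.all (fun c => PySem.Set.contains (PySem.Set.ofList lt) c)) = true
      · simp only [if_pos hb]
        have hnd : ¬ (∃ d ∈ b, d ∉ lt) := by rw [hiff]; simpa using hb
        tauto
      · simp only [if_neg hb, PySem.Set.mem_update]
        have hd : (∃ d ∈ b, d ∉ lt) := hiff.mpr hb
        constructor
        · rintro ((h | h) | h)
          · exact Or.inl h
          · exact Or.inr (Or.inl ⟨h, hd⟩)
          · exact Or.inr (Or.inr h)
        · rintro (h | ⟨hc, _⟩ | h)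
          · exact Or.inl (Or.inl h)
          · exact Or.inl (Or.inr hc)
          · exact Or.inr h

theorem bKey?_eq_some_iff (c : List Int) (p : Int × Int) :
    bKey? c = some p ↔ c = [p.1, p.2] ∧ 1 ≤ p.1 ∧ p.1 ≤ 16 ∧ 1 ≤ p.2 ∧ p.2 ≤ 16 := by
  match c with
  | [] => simp [bKey?]
  | [x] => simp [bKey?]
  | x :: y :: z :: r => simp [bKey?]
  | [x, y] =>
    simp only [bKey?]
    split_ifs with h
    · constructor
      · rintro h'; cases h'; exact ⟨rfl, h⟩
      · rintro ⟨he, _⟩; cases he; rfl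
    · constructor
      · rintro h'; cases h'
      · rintro ⟨he, h1, h2, h3, h4⟩; cases he; exact absurd ⟨h1, h2, h3, h4⟩ h

theorem estado_fold_eq_map (bt bh : List (List Int)) (lt : List (List Int)) :
    lt.foldl (fun acc c =>
      if c ∈ bt then acc ++ ["T"]
      else if c ∈ bh then acc ++ ["H"]
      else acc ++ ["A"]) [] =
    lt.map (fun c => if c ∈ bt then "T" else if c ∈ bh then "H" else "A") := by
  have h : ∀ c (acc : List String),
      (if c ∈ bt then acc ++ ["T"] else if c ∈ bh then acc ++ ["H"] else acc ++ ["A"]) =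
        acc ++ [if c ∈ bt then "T" else if c ∈ bh then "H" else "A"] := by
    intro c acc; split_ifs <;> rfl
  have e : (fun (acc : List String) c =>
      if c ∈ bt then acc ++ ["T"] else if c ∈ bh then acc ++ ["H"] else acc ++ ["A"]) =
      (fun acc c => acc ++ [if c ∈ bt then "T" else if c ∈ bh then "H" else "A"]) := by
    funext acc c; exact h c acc
  rw [e]
  simpa using PySem.List.foldl_append_singleton_eq_map
    (fun c => if c ∈ bt then "T" else if c ∈ bh then "H" else "A") lt []

theorem touch_fold_getD (i j : Int) (hi1 : 1 ≤ i) (hi2 : i ≤ 16) (hj1 : 1 ≤ j) (hj2 : j ≤ 16)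
    (v : List Int → String) (dflt : String) :
    ∀ (lt : List (List Int)) (d0 : PySem.Dict (Int × Int) String),
    (lt.foldl (fun d c => match bKey? c with
      | some k => d.insert k (v c)
      | none => d) d0).getD (i, j) dflt =
      if [i, j] ∈ lt then v [i, j] else d0.getD (i, j) dflt := by
  intro lt
  induction lt with
  | nil => simp
  | cons c cs ih =>
    intro d0
    simp only [List.foldl_cons, List.mem_cons]
    rcases hk : bKey? c with _ | k
    · have hne : c ≠ [i, j] := by
        intro he; subst he
        rw [bKey?_eq_some_iff [i, j] (i, j) |>.mpr ⟨rfl, hi1, hi2, hj1, hj2⟩] at hk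
        cases hk
      rw [ih d0, if_congr (show ([i, j] = c ∨ [i, j] ∈ cs) ↔ [i, j] ∈ cs from
        ⟨fun h => h.elim (fun h' => absurd h'.symm hne) id, Or.inr⟩) rfl rfl]
    · have hc := (bKey?_eq_some_iff c k).mp hk
      by_cases hkij : k = (i, j)
      · subst hkij
        have hcij : c = [i, j] := hc.1
        subst hcij
        rw [ih]
        by_cases hm : [i, j] ∈ cs <;>
          simp [hm, PySem.Dict.getD_insert_self]
      · have hne : c ≠ [i, j] := by
          intro he; subst he
          rw [bKey?_eq_some_iff [i, j] (i, j) |>.mpr ⟨rfl, hi1, hi2, hj1, hj2⟩] at hk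
          cases hk; exact hkij rfl
        rw [ih, PySem.Dict.getD_insert_of_ne _ _ _ (fun h => hkij h.symm),
          if_congr (show ([i, j] = c ∨ [i, j] ∈ cs) ↔ [i, j] ∈ cs from
            ⟨fun h => h.elim (fun h' => absurd h'.symm hne) id, Or.inr⟩) rfl rfl]

theorem ship_fold_getD (i j : Int) (hi1 : 1 ≤ i) (hi2 : i ≤ 16) (hj1 : 1 ≤ j) (hj2 : j ≤ 16)
    (dflt : String) :
    ∀ (lb : List (List (List Int))) (d0 : PySem.Dict (Int × Int) String),
    (lb.foldl (fun d ship => ship.foldl (fun d c => match bKey? c with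
      | some k => d.insert k " ¤¤ │"
      | none => d) d) d0).getD (i, j) dflt =
      if ∃ s ∈ lb, [i, j] ∈ s then " ¤¤ │" else d0.getD (i, j) dflt := by
  intro lb
  induction lb with
  | nil => simp
  | cons b bs ih =>
    intro d0
    simp only [List.foldl_cons, List.mem_cons, exists_eq_or_imp, ih]
    rw [touch_fold_getD i j hi1 hi2 hj1 hj2 (fun _ => " ¤¤ │") dflt b d0]
    by_cases hb : [i, j] ∈ b
    · simp [hb]
    · by_cases hbs : ∃ s ∈ bs, [i, j] ∈ s <;> simp [hb, hbs]


theorem aEstado_eq_map (lb : List (List (List Int))) (lt : List (List Int)) :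
    aEstado lb lt = lt.map (fun c =>
      if c ∈ (aHull lb lt).2 then "T" else if c ∈ (aHull lb lt).1 then "H" else "A") := by
  unfold aEstado
  exact estado_fold_eq_map (aHull lb lt).2 (aHull lb lt).1 lt

theorem bCellMap_getD (lb : List (List (List Int))) (lt : List (List Int)) (turno : Int)
    (i j : Int) (hi1 : 1 ≤ i) (hi2 : i ≤ 16) (hj1 : 1 ≤ j) (hj2 : j ≤ 16) :
    (bCellMap lb lt turno).getD (i, j) "    │" =
      if [i, j] ∈ lt then
        (if [i, j] ∈ (bSets lb lt).2 then " ░░ │"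
         else if [i, j] ∈ (bSets lb lt).1 then " ██ │" else " ~~ │")
      else if turno = 1 then
        (if ∃ s ∈ lb, [i, j] ∈ s then " ¤¤ │" else "    │")
      else "    │" := by
  unfold bCellMap
  rw [touch_fold_getD i j hi1 hi2 hj1 hj2 _ _ lt _]
  by_cases h : [i, j] ∈ lt
  · simp only [if_pos h]
    simp [PySem.Set.contains_iff]
  · simp only [if_neg h]
    by_cases ht : turno = 1
    · simp only [if_pos ht]
      rw [ship_fold_getD i j hi1 hi2 hj1 hj2 _ lb _]
      by_cases hb : ∃ s ∈ lb, [i, j] ∈ s <;> simp [hb]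
    · simp [if_neg ht]

theorem cell_eq (lb : List (List (List Int))) (lt : List (List Int)) (turno : Int)
    (i j : Int) (hi1 : 1 ≤ i) (hi2 : i ≤ 16) (hj1 : 1 ≤ j) (hj2 : j ≤ 16) :
    aSym lb lt (aEstado lb lt) turno i j = (bCellMap lb lt turno).getD (i, j) "    │" := by
  rw [bCellMap_getD lb lt turno i j hi1 hi2 hj1 hj2]
  unfold aSym
  by_cases h : [i, j] ∈ lt
  · simp only [if_pos h]
    obtain ⟨k, hk⟩ := Option.isSome_iff_exists.mp ((PySem.List.index?_isSome_iff lt [i, j]).mpr h)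
    obtain ⟨hklen, hkv, -⟩ := PySem.List.getElem_of_index?_eq_some hk
    rw [aEstado_eq_map, hk]
    simp only [Option.getD_some, PySem.List.pyGetD_natCast]
    rw [List.getD_eq_getElem?_getD, List.getElem?_map]
    rw [List.getElem?_eq_getElem hklen, hkv]
    simp only [Option.map_some, Option.getD_some]
    have hT : [i, j] ∈ (aHull lb lt).2 ↔ [i, j] ∈ (bSets lb lt).2 := by
      rw [mem_aHull_snd, mem_bSets_snd]
    have hH : [i, j] ∈ (aHull lb lt).1 ↔ [i, j] ∈ (bSets lb lt).1 := by
      rw [mem_aHull_fst, mem_bSets_fst]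
    by_cases h2 : [i, j] ∈ (aHull lb lt).2
    · simp [h2, hT.mp h2]
    · have hb2 : [i, j] ∉ (bSets lb lt).2 := fun hh => h2 (hT.mpr hh)
      by_cases h1 : [i, j] ∈ (aHull lb lt).1
      · simp [h2, h1, hb2, hH.mp h1, (by decide : ("H" : String) ≠ "T")]
      · have hb1 : [i, j] ∉ (bSets lb lt).1 := fun hh => h1 (hH.mpr hh)
        simp [h2, h1, hb2, hb1, (by decide : ("A" : String) ≠ "T"),
          (by decide : ("A" : String) ≠ "H")]
  · simp only [if_neg h]
    by_cases ht : turno = 1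
    · simp only [if_pos ht, if_pos ht]
      by_cases hb : lb.any (fun k => [i, j] ∈ k)
      · rw [if_pos hb, if_pos (by simpa using hb)]
      · rw [if_neg hb, if_neg (by simpa using hb)]
    · simp [ht]

theorem modify_append_cons {α : Type} (front : List α) (x : α) (rest : List α) (f : α → α) :
    (front ++ x :: rest).modify front.length f = front ++ f x :: rest := by
  induction front with
  | nil => simp [List.modify]
  | cons a l ih => simpa [List.modify] using ih

theorem fill_fold {α : Type} (g : Int → α) :
    ∀ (n : Nat) (front : List (List α)) (x : List α) (rest : List (List α)),
    (PySem.List.pyRange 1 ((n : Int) + 1)).foldl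
        (fun t j => t.modify front.length (fun fila => fila ++ [g j])) (front ++ x :: rest) =
      front ++ (x ++ (List.range n).map (fun c : Nat => g ((c : Int) + 1))) :: rest := by
  intro n
  induction n with
  | zero => intro front x rest; simp [PySem.List.pyRange]
  | succ n ih =>
    intro front x rest
    have hsp : PySem.List.pyRange 1 (((n : Nat) + 1 : Int) + 1) =
        PySem.List.pyRange 1 ((n : Int) + 1) ++ [(n : Int) + 1] := by
      have := PySem.List.pyRange_one_succ_right (a := 1) (b := (n : Int) + 1) (by omega)
      simpa using this
    rw [show (((n + 1 : Nat) : Int) + 1) = (((n : Nat) + 1 : Int) + 1) by push_cast; ring, hsp,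
      List.foldl_append, ih front x rest]
    simp only [List.foldl_cons, List.foldl_nil, modify_append_cons, List.range_succ, List.map_append,
      List.map_cons, List.map_nil, List.append_assoc]

theorem board_fold (f : Int → Int → String) :
    ∀ (m : Nat),
    (PySem.List.pyRange 0 ((m : Int) + 1) 1).foldl (fun tablero i =>
      let tablero := tablero ++ [[PySem.List.pyGetD pvColumnas i "", "│"]]
      if i > 0 then
        (PySem.List.pyRange 1 17 1).foldl (fun tab j =>
          tab.modify i.toNat (fun fila => fila ++ [f i j])) tablero
      else tablero) [pvCabecera] =
    [pvCabecera] ++ (List.range m).map (fun r =>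
        [pvColumnas.getD r "", "│"] ++ (List.range 16).map (fun c : Nat => f ((r : Int) + 1) ((c : Int) + 1)))
      ++ [[pvColumnas.getD m "", "│"]] := by
  intro m
  induction m with
  | zero =>
    rw [show ((0 : Nat) : Int) + 1 = 1 by norm_num,
      show PySem.List.pyRange 0 1 1 = [0] from rfl]
    simp only [List.foldl_cons, List.foldl_nil]
    rw [if_neg (by omega)]
    rfl
  | succ m ih =>
    rw [show ((m + 1 : Nat) : Int) + 1 = ((m : Int) + 1) + 1 by push_cast; ring,
      PySem.List.pyRange_one_succ_right (a := 0) (b := (m : Int) + 1) (by omega),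
      List.foldl_append, ih]
    simp only [List.foldl_cons, List.foldl_nil]
    rw [if_pos (by omega)]
    have htn : ((m : Int) + 1).toNat = m + 1 := by omega
    have hfront : (m + 1 : Nat) =
        ([pvCabecera] ++ (List.range m).map (fun r =>
          [pvColumnas.getD r "", "│"] ++ (List.range 16).map (fun c : Nat => f ((r : Int) + 1) ((c : Int) + 1)))).length := by
      simp
    rw [htn]
    rw [show (17 : Int) = ((16 : Nat) : Int) + 1 by norm_num]
    rw [List.append_assoc, List.append_assoc]
    have := fill_fold (f ((m : Int) + 1)) 16
      ([pvCabecera] ++ (List.range m).map (fun r =>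
        [pvColumnas.getD r "", "│"] ++ (List.range 16).map (fun c : Nat => f ((r : Int) + 1) ((c : Int) + 1))))
      [pvColumnas.getD m "", "│"]
      [[PySem.List.pyGetD pvColumnas ((m : Int) + 1) "", "│"]]
    simp only [List.length_append, List.length_cons, List.length_nil, List.length_map, List.length_range] at this
    have hcol : PySem.List.pyGetD pvColumnas ((m : Int) + 1) "" = pvColumnas.getD (m + 1) "" := by
      rw [show ((m : Int) + 1) = ((m + 1 : Nat) : Int) by push_cast; ring, PySem.List.pyGetD_natCast]
    rw [show (0 + 1 + m) = m + 1 from by omega, hcol] at this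
    rw [hcol]
    simp only [List.range_succ, List.map_append, List.map_cons, List.map_nil, List.append_assoc,
      List.cons_append, List.nil_append, List.singleton_append] at this ⊢
    exact this


theorem calcA_eq_map (lb : List (List (List Int))) (lt : List (List Int)) (turno : Int) :
    calcularEstadoTablero lb lt turno =
      [pvCabecera] ++
        (List.range 16).map (fun r =>
          [pvColumnas.getD r "", "│"] ++
            (List.range 16).map (fun c : Nat => aSym lb lt (aEstado lb lt) turno ((r : Int) + 1) ((c : Int) + 1))) ++
      [[pvColumnas.getD 16 "", "│"]] := by
  have h := board_fold (aSym lb lt (aEstado lb lt) turno) 16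
  rw [show (((16 : Nat) : Int) + 1) = 17 by norm_num] at h
  unfold calcularEstadoTablero
  exact h

-- ===== VERDICT (by name: the statement is the Claim_ definition above) =====
theorem calcularEstadoTablero_spec : Claim_equal_calcularEstadoTablero := by
  intro lb lt turno _
  show calcularEstadoTablero lb lt turno = calcularEstadoTablero_alt lb lt turno
  rw [calcA_eq_map]
  unfold calcularEstadoTablero_alt
  rw [show pvColumnas.getD 16 "" = "" from rfl]
  congr 1
  congr 1
  apply List.map_congr_left
  intro r hr
  congr 1
  apply List.map_congr_left
  intro j hj
  simp only [List.mem_range] at hr hj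
  exact cell_eq lb lt turno _ _ (by omega) (by omega) (by omega) (by omega)
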